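-- pv_equiv track=rewrite | github.com/BGemler/advanced_sequence_correlations | get_correlation_matrices.py | generate_contingency_table
-- ===== SOURCE A (Python) =====
-- def generate_contingency_table(sequences, position_i, symbol_index_i, position_j, symbol_index_j, unique_symbols):
-- 	"""
-- 	"""
-- 	symbol_i = unique_symbols[symbol_index_i]
-- 	symbol_j = unique_symbols[symbol_index_j]
--
-- 	num_i_not_j = 0
-- 	num_j_not_i = 0
-- 	num_i_j = 0
-- 	num_not_i_not_j = 0
--
-- 	for seq in sequences:
-- 		seq_symbol_i = seq[position_i]
-- 		seq_symbol_j = seq[position_j]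
--
-- 		if seq_symbol_i == symbol_i and seq_symbol_j == symbol_j:
-- 			num_i_j += 1
-- 		elif seq_symbol_i == symbol_i and seq_symbol_j != symbol_j:
-- 			num_i_not_j += 1
-- 		elif seq_symbol_i != symbol_i and seq_symbol_j == symbol_j:
-- 			num_j_not_i += 1
-- 		elif seq_symbol_i != symbol_i and seq_symbol_j != symbol_j:
-- 			num_not_i_not_j += 1
--
-- 	cont_table = [[num_not_i_not_j, num_i_not_j], [num_j_not_i, num_i_j]]
--
-- 	return cont_table
-- ===== SOURCE B (Python) =====
-- def generate_contingency_table(sequences, position_i, symbol_index_i, position_j, symbol_index_j, unique_symbols):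
-- 	symbol_i = unique_symbols[symbol_index_i]
-- 	symbol_j = unique_symbols[symbol_index_j]
--
-- 	hits_i = [seq[position_i] == symbol_i for seq in sequences]
-- 	hits_j = [seq[position_j] == symbol_j for seq in sequences]
--
-- 	count_i = hits_i.count(True)
-- 	count_j = hits_j.count(True)
-- 	count_both = list(zip(hits_i, hits_j)).count((True, True))
-- 	n = len(sequences)
--
-- 	return [[n - count_i - count_j + count_both, count_i - count_both],
-- 			[count_j - count_both, count_both]]
-- ===== Notes on version B (the rewrite author's own statement) =====
-- stated objective: alternative
-- what changed: A keeps four table cells in one loop with a four-way if/elif branch; B instead builds two boolean hit lists in staged passes, counts True in each and (True, True) in their zip, and derives all four cells after the fact by inclusion-exclusion.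
import Mathlib
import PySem

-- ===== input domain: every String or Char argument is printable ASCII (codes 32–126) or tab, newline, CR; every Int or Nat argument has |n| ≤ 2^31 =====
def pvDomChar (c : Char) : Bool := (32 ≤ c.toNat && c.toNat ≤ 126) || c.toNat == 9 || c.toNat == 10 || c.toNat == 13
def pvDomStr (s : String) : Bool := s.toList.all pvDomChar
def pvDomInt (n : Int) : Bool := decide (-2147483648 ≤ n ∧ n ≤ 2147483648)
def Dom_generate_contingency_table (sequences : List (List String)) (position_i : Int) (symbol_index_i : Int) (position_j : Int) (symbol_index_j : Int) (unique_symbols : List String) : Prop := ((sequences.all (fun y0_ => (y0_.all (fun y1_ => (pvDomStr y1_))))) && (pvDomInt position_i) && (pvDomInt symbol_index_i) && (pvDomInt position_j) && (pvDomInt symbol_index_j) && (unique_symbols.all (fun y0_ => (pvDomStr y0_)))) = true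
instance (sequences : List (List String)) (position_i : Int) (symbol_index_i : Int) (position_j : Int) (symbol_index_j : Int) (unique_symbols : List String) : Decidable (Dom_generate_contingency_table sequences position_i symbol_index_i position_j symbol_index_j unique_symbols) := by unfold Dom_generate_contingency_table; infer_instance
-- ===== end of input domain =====

-- B replaces A's single loop with a four-way if/elif over the four table cells by staged
-- passes: two boolean hit lists, three counts over them, and inclusion-exclusion
-- to derive the four cells (objective: alternative).

-- ===== PORT A =====
-- A's loop body: four-way branch over the four cells (num_i_not_j, num_j_not_i, num_i_j, num_not_i_not_j)
def gctStepA (symbol_i symbol_j : String) (position_i position_j : Int)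
    (st : Int × Int × Int × Int) (seq : List String) : Int × Int × Int × Int :=
  let seq_symbol_i := PySem.List.pyGetD seq position_i ""
  let seq_symbol_j := PySem.List.pyGetD seq position_j ""
  if seq_symbol_i = symbol_i ∧ seq_symbol_j = symbol_j then (st.1, st.2.1, st.2.2.1 + 1, st.2.2.2)
  else if seq_symbol_i = symbol_i ∧ seq_symbol_j ≠ symbol_j then (st.1 + 1, st.2.1, st.2.2.1, st.2.2.2)
  else if seq_symbol_i ≠ symbol_i ∧ seq_symbol_j = symbol_j then (st.1, st.2.1 + 1, st.2.2.1, st.2.2.2)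
  else if seq_symbol_i ≠ symbol_i ∧ seq_symbol_j ≠ symbol_j then (st.1, st.2.1, st.2.2.1, st.2.2.2 + 1)
  else st

def generate_contingency_table (sequences : List (List String)) (position_i : Int) (symbol_index_i : Int) (position_j : Int) (symbol_index_j : Int) (unique_symbols : List String) : List (List Int) :=
  let symbol_i := PySem.List.pyGetD unique_symbols symbol_index_i ""
  let symbol_j := PySem.List.pyGetD unique_symbols symbol_index_j ""
  let st := sequences.foldl (gctStepA symbol_i symbol_j position_i position_j) (0, 0, 0, 0)
  [[st.2.2.2, st.1], [st.2.1, st.2.2.1]]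

-- ===== PORT B =====
def generate_contingency_table_alt (sequences : List (List String)) (position_i : Int) (symbol_index_i : Int) (position_j : Int) (symbol_index_j : Int) (unique_symbols : List String) : List (List Int) :=
  let symbol_i := PySem.List.pyGetD unique_symbols symbol_index_i ""
  let symbol_j := PySem.List.pyGetD unique_symbols symbol_index_j ""
  let hits_i := sequences.map (fun seq => PySem.List.pyGetD seq position_i "" == symbol_i)
  let hits_j := sequences.map (fun seq => PySem.List.pyGetD seq position_j "" == symbol_j)
  let count_i : Int := (hits_i.count true : Nat)
  let count_j : Int := (hits_j.count true : Nat)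
  let count_both : Int := ((hits_i.zip hits_j).count (true, true) : Nat)
  let n : Int := (sequences.length : Nat)
  [[n - count_i - count_j + count_both, count_i - count_both],
   [count_j - count_both, count_both]]

-- ===== PRECONDITION & SPEC =====
-- Pre_ excludes exactly the inputs where the Python A raises IndexError: a symbol index
-- outside unique_symbols, or a position out of range for some sequence.
def Pre_generate_contingency_table (sequences : List (List String)) (position_i : Int) (symbol_index_i : Int) (position_j : Int) (symbol_index_j : Int) (unique_symbols : List String) : Prop :=
  PySem.Raise.InRange unique_symbols.length symbol_index_i ∧
  PySem.Raise.InRange unique_symbols.length symbol_index_j ∧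
  ∀ seq ∈ sequences, PySem.Raise.InRange seq.length position_i ∧ PySem.Raise.InRange seq.length position_j
instance (sequences : List (List String)) (position_i : Int) (symbol_index_i : Int) (position_j : Int) (symbol_index_j : Int) (unique_symbols : List String) : Decidable (Pre_generate_contingency_table sequences position_i symbol_index_i position_j symbol_index_j unique_symbols) := by unfold Pre_generate_contingency_table; infer_instance

def pvWitness_generate_contingency_table : List (List String) × Int × Int × Int × Int × List String :=
  ([["a", "b"], ["b", "b"], ["a", "a"]], 0, 0, 1, 1, ["a", "b"])

def Spec_generate_contingency_table (sequences : List (List String)) (position_i : Int) (symbol_index_i : Int) (position_j : Int) (symbol_index_j : Int) (unique_symbols : List String) (out : List (List Int)) : Prop := out = generate_contingency_table_alt sequences position_i symbol_index_i position_j symbol_index_j unique_symbols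
instance (sequences : List (List String)) (position_i : Int) (symbol_index_i : Int) (position_j : Int) (symbol_index_j : Int) (unique_symbols : List String) (out : List (List Int)) : Decidable (Spec_generate_contingency_table sequences position_i symbol_index_i position_j symbol_index_j unique_symbols out) := by unfold Spec_generate_contingency_table; infer_instance

-- ===== CLAIM (what is proved, stated in full; the proofs are below) =====
def Claim_equal_generate_contingency_table : Prop := ∀ (sequences : List (List String)) (position_i : Int) (symbol_index_i : Int) (position_j : Int) (symbol_index_j : Int) (unique_symbols : List String), Dom_generate_contingency_table sequences position_i symbol_index_i position_j symbol_index_j unique_symbols → Pre_generate_contingency_table sequences position_i symbol_index_i position_j symbol_index_j unique_symbols → Spec_generate_contingency_table sequences position_i symbol_index_i position_j symbol_index_j unique_symbols (generate_contingency_table sequences position_i symbol_index_i position_j symbol_index_j unique_symbols)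

-- ===== LEMMAS AND PROOFS =====

-- B's three counts, as Int, used only in the proofs.
def pCnt (p : Int) (s : String) (seqs : List (List String)) : Int :=
  ((seqs.map (fun seq => PySem.List.pyGetD seq p "" == s)).count true : Nat)

def pCB (pi pj : Int) (si sj : String) (seqs : List (List String)) : Int :=
  (((seqs.map (fun seq => PySem.List.pyGetD seq pi "" == si)).zip
    (seqs.map (fun seq => PySem.List.pyGetD seq pj "" == sj))).count (true, true) : Nat)

theorem pCnt_cons (p : Int) (s : String) (seq : List String) (rest : List (List String)) :
    pCnt p s (seq :: rest)
      = pCnt p s rest + (if PySem.List.pyGetD seq p "" = s then 1 else 0) := by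
  simp only [pCnt, List.map_cons, List.count_cons]
  by_cases h : PySem.List.pyGetD seq p "" = s <;> simp [h]

theorem pCB_cons (pi pj : Int) (si sj : String) (seq : List String) (rest : List (List String)) :
    pCB pi pj si sj (seq :: rest)
      = pCB pi pj si sj rest
        + (if PySem.List.pyGetD seq pi "" = si ∧ PySem.List.pyGetD seq pj "" = sj then 1 else 0) := by
  simp only [pCB, List.map_cons, List.zip_cons_cons, List.count_cons]
  by_cases hi : PySem.List.pyGetD seq pi "" = si <;>
    by_cases hj : PySem.List.pyGetD seq pj "" = sj <;> simp [hi, hj, Prod.ext_iff]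

-- A's fold computes B's counts, arranged by inclusion-exclusion.
theorem gct_foldA (si sj : String) (pi pj : Int) (seqs : List (List String))
    (st : Int × Int × Int × Int) :
    seqs.foldl (gctStepA si sj pi pj) st
      = (st.1 + (pCnt pi si seqs - pCB pi pj si sj seqs),
         st.2.1 + (pCnt pj sj seqs - pCB pi pj si sj seqs),
         st.2.2.1 + pCB pi pj si sj seqs,
         st.2.2.2 + ((seqs.length : Int) - pCnt pi si seqs - pCnt pj sj seqs
                      + pCB pi pj si sj seqs)) := by
  induction seqs generalizing st with
  | nil => simp [pCnt, pCB]
  | cons seq rest ih =>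
    simp only [List.foldl_cons, ih, pCnt_cons, pCB_cons, List.length_cons]
    by_cases hi : PySem.List.pyGetD seq pi "" = si <;>
      by_cases hj : PySem.List.pyGetD seq pj "" = sj <;>
        · simp [gctStepA, hi, hj, Prod.ext_iff]
          try omega

theorem generate_contingency_table_spec : Claim_equal_generate_contingency_table := by
  intro sequences position_i symbol_index_i position_j symbol_index_j unique_symbols _ _
  unfold Spec_generate_contingency_table generate_contingency_table generate_contingency_table_alt
  simp only [gct_foldA]
  simp only [pCnt, pCB]
  norm_num
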